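-- pv_equiv track=rewrite | github.com/erikseulean/python-algo | Problems/shortest_subarray_containing_words_in_given_order.py | improved
-- ===== SOURCE A (Python) =====
-- def improved(words, text):
--     indexes = { words[i]:i for i in range(len(words))}
--     last_occurence = {}
--     dp = [-1 for _ in range(len(words))]
--     min_value, mstart, mend = len(text), 0, 0
--     for i in range(len(text)):
--         if text[i] in indexes:
--             last_occurence[indexes[text[i]]] = i
--             if indexes[text[i]] == 0:
--                 dp[0] = 0
--             elif dp[indexes[text[i]] - 1] != -1:
--                 dp[indexes[text[i]]] = dp[indexes[text[i]] - 1] + i - last_occurence[indexes[text[i]] - 1]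
--             else:
--                 dp[indexes[text[i]]] = -1
--
--             if dp[indexes[text[i]]] != -1 and indexes[text[i]] == len(words) - 1 and min_value > dp[indexes[text[i]]]:
--                 min_value = dp[indexes[text[i]]]
--                 mstart, mend = i - dp[indexes[text[i]]], i + 1
--
--     return text[mstart:mend]
-- ===== SOURCE B (Python) =====
-- def improved(words, text):
--     indexes = {w: i for i, w in enumerate(words)}
--     last = len(words) - 1
--     best = None  # (start, end) of the best window so far
--     for i, w in enumerate(text):
--         if indexes.get(w) != last:
--             continue
--         # backward scan: chain latest earlier occurrences of indices last-1 .. 0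
--         pos = i
--         k = last - 1
--         while k >= 0:
--             j = pos - 1
--             while j >= 0 and indexes.get(text[j]) != k:
--                 j -= 1
--             if j < 0:
--                 break
--             pos = j
--             k -= 1
--         if k >= 0:
--             continue
--         if best is None or i - pos < best[1] - best[0] - 1:
--             best = (pos, i + 1)
--     return text[best[0]:best[1]] if best is not None else text[0:0]
-- ===== Notes on version B (the rewrite author's own statement) =====
-- stated objective: alternative
-- what changed: A keeps a forward DP (last_occurence dict + dp array of running window lengths with a -1 sentinel) updated at every matched word; B keeps no per-index state at all and instead, at each occurrence of the final word, scans the text backwards chaining the latest earlier occurrence of each preceding index to recover the window start.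
import Mathlib
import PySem

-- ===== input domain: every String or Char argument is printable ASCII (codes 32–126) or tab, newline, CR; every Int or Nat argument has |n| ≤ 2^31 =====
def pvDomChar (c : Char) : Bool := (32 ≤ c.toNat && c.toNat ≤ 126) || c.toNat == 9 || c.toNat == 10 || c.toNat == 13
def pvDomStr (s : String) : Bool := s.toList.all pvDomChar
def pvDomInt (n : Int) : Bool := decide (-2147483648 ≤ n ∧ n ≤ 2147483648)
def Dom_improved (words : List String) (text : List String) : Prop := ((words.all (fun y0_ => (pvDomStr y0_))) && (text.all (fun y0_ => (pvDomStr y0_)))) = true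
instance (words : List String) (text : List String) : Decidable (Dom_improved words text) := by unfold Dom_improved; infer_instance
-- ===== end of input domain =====

-- B drops A's forward DP state (last_occurence dict + dp array of lengths) and instead,
-- at each occurrence of the final word, scans the text backwards chaining the latest
-- earlier occurrence of each preceding index; alternative algorithm, not faster.

-- ===== PORT A =====
-- shared by both ports: the dict comprehension {words[i]: i} (last index wins on duplicates)
def mkIndexes (words : List String) : PySem.Dict String Int :=
  (PySem.List.enumerate words 0).foldl (fun d p => d.insert p.2 p.1) PySem.Dict.empty

-- the 'for i in range(len(text))' loop of A, state (last_occurence, dp, min_value, mstart, mend)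
def improvedGoA (L : Int) (indexes : PySem.Dict String Int)
    (i : Int) (rest : List String)
    (lo : PySem.Dict Int Int) (dp : List Int)
    (mv ms me : Int) : Int × Int :=
  match rest with
  | [] => (ms, me)
  | w :: rest' =>
    match indexes.get? w with
    | none => improvedGoA L indexes (i+1) rest' lo dp mv ms me
    | some k =>
      let lo' := lo.insert k i
      let dp' :=
        if k = 0 then dp.set 0 0
        else if dp.getD (k-1).toNat 0 ≠ -1 then
          dp.set k.toNat (dp.getD (k-1).toNat 0 + i - lo'.getD (k-1) 0)
        else dp.set k.toNat (-1)
      let dpk := dp'.getD k.toNat 0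
      if dpk ≠ -1 ∧ k = L - 1 ∧ mv > dpk then
        improvedGoA L indexes (i+1) rest' lo' dp' dpk (i - dpk) (i+1)
      else
        improvedGoA L indexes (i+1) rest' lo' dp' mv ms me

def improved (words : List String) (text : List String) : List String :=
  let r := improvedGoA (words.length : Int) (mkIndexes words) 0 text PySem.Dict.empty
      (List.replicate words.length (-1)) (text.length : Int) 0 0
  PySem.List.slice text (some r.1) (some r.2)

-- ===== PORT B =====
-- B's inner while loop: latest position j < pos with indexes.get(text[j]) == k (none = scan fell off)
-- (text[j] with 0 ≤ j < len(text) is exact as List.getD)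
def latestB (indexes : PySem.Dict String Int) (text : List String) : Nat → Int → Option Nat
  | 0, _ => none
  | pos+1, k =>
    if indexes.get? (text.getD pos "") = some k then some pos
    else latestB indexes text pos k

-- B's outer while loop: chain kk remaining indices (kk-1 down to 0) backwards from pos
def chainB (indexes : PySem.Dict String Int) (text : List String) : Nat → Nat → Option Nat
  | pos, 0 => some pos
  | pos, kk+1 =>
    match latestB indexes text pos (kk : Int) with
    | none => none
    | some p => chainB indexes text p kk

-- B's 'for i, w in enumerate(text)' loop, state best = (start, end) or none
def improvedGoB (L : Int) (indexes : PySem.Dict String Int) (text : List String) :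
    Nat → List String → Option (Nat × Nat) → Option (Nat × Nat)
  | _, [], best => best
  | i, w :: rest', best =>
    let best' :=
      if indexes.get? w = some (L - 1) then
        match chainB indexes text i (L - 1).toNat with
        | none => best
        | some pos =>
          match best with
          | none => some (pos, i + 1)
          | some (bs, be) =>
            if (i : Int) - pos < (be : Int) - bs - 1 then some (pos, i + 1) else best
      else best
    improvedGoB L indexes text (i + 1) rest' best'

def improved_alt (words : List String) (text : List String) : List String :=
  match improvedGoB (words.length : Int) (mkIndexes words) text 0 text none with
  | some (s, e) => PySem.List.slice text (some (s : Int)) (some (e : Int))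
  | none => PySem.List.slice text (some 0) (some 0)

-- ===== PRECONDITION & SPEC =====
def Spec_improved (words : List String) (text : List String) (out : List String) : Prop := out = improved_alt words text
instance (words : List String) (text : List String) (out : List String) : Decidable (Spec_improved words text out) := by unfold Spec_improved; infer_instance

-- ===== CLAIM (what is proved, stated in full; the proofs are below) =====
def Claim_equal_improved : Prop := ∀ (words : List String) (text : List String), Dom_improved words text → Spec_improved words text (improved words text)

-- ===== LEMMAS AND PROOFS =====

-- the value A's dp slot k holds after processing text[0:n]
def chainVal (indexes : PySem.Dict String Int) (text : List String) (n : Nat) (k : Int) : Int :=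
  match latestB indexes text n k with
  | none => -1
  | some p =>
    match chainB indexes text p k.toNat with
    | none => -1
    | some s => (p : Int) - (s : Int)

-- relation between A's (min_value, mstart, mend) and B's best
def BestInv (tlen mv ms me : Int) (best : Option (Nat × Nat)) : Prop :=
  (best = none ∧ mv = tlen ∧ ms = 0 ∧ me = 0) ∨
  (∃ s e : Nat, best = some (s, e) ∧ ms = (s : Int) ∧ me = (e : Int) ∧ mv = (e : Int) - s - 1)

def bestToPair (best : Option (Nat × Nat)) : Int × Int :=
  match best with
  | none => (0, 0)
  | some (s, e) => ((s : Int), (e : Int))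

lemma getD_set_self {α : Type} (xs : List α) (n : Nat) (v d : α) (h : n < xs.length) :
    (xs.set n v).getD n d = v := by
  simp [List.getD, h]

lemma getD_set_ne {α : Type} (xs : List α) (m n : Nat) (v d : α) (h : m ≠ n) :
    (xs.set m v).getD n d = xs.getD n d := by
  simp [List.getD, h]

lemma mkIndexes_aux_range (words : List String) :
    ∀ (s : Int) (d : PySem.Dict String Int) (w : String) (k : Int),
      ((PySem.List.enumerate words s).foldl (fun d p => d.insert p.2 p.1) d).get? w = some k →
      d.get? w = some k ∨ (s ≤ k ∧ k < s + words.length) := by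
  induction words with
  | nil => intro s d w k h; simp [PySem.List.enumerate_nil] at h; exact Or.inl h
  | cons x xs ih =>
    intro s d w k h
    rw [PySem.List.enumerate_cons] at h
    simp only [List.foldl_cons] at h
    rcases ih (s+1) (d.insert x s) w k h with h' | h'
    · rw [PySem.Dict.get?_insert] at h'
      split at h'
      · right; cases h'; constructor <;> simp
      · exact Or.inl h'
    · right
      simp only [List.length_cons]
      push_cast
      omega

lemma mkIndexes_range (words : List String) (w : String) (k : Int)
    (h : (mkIndexes words).get? w = some k) : 0 ≤ k ∧ k < (words.length : Int) := by
  rcases mkIndexes_aux_range words 0 PySem.Dict.empty w k h with h' | h'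
  · simp [PySem.Dict.get?_empty] at h'
  · omega

lemma latestB_lt (indexes : PySem.Dict String Int) (text : List String) :
    ∀ (pos : Nat) (k : Int) (p : Nat), latestB indexes text pos k = some p → p < pos := by
  intro pos
  induction pos with
  | zero => intro k p h; simp [latestB] at h
  | succ m ih =>
    intro k p h
    rw [latestB] at h
    split at h
    · cases h; omega
    · exact Nat.lt_trans (ih k p h) (Nat.lt_succ_self m)

lemma chainB_le (indexes : PySem.Dict String Int) (text : List String) :
    ∀ (kk pos s : Nat), chainB indexes text pos kk = some s → s ≤ pos := by
  intro kk
  induction kk with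
  | zero => intro pos s h; rw [chainB] at h; cases h; exact le_refl _
  | succ m ih =>
    intro pos s h
    rw [chainB] at h
    cases hp : latestB indexes text pos (m : Int) with
    | none => rw [hp] at h; cases h
    | some p =>
      rw [hp] at h
      exact le_trans (ih p s h) (le_of_lt (latestB_lt indexes text pos _ p hp))

-- main loop invariant: A's state is determined by the backward-scan functions of B
lemma go_eq (L : Int) (indexes : PySem.Dict String Int) (text : List String)
    (hidx : ∀ w k, indexes.get? w = some k → 0 ≤ k ∧ k < L) :
    ∀ (rest : List String) (n : Nat) (lo : PySem.Dict Int Int) (dp : List Int)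
      (mv ms me : Int) (best : Option (Nat × Nat)),
      text.drop n = rest →
      (dp.length : Int) = L →
      (∀ k : Int, 0 ≤ k → k < L →
        lo.get? k = (latestB indexes text n k).map (fun p => (p : Int)) ∧
        dp.getD k.toNat 0 = chainVal indexes text n k) →
      BestInv (text.length : Int) mv ms me best →
      improvedGoA L indexes (n : Int) rest lo dp mv ms me =
        bestToPair (improvedGoB L indexes text n rest best) := by
  intro rest
  induction rest with
  | nil =>
    intro n lo dp mv ms me best _ _ _ hbest
    rcases hbest with ⟨hb, _, hms, hme⟩ | ⟨s, e, hb, hms, hme, _⟩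
    · rw [improvedGoA, improvedGoB, hb, hms, hme]; rfl
    · rw [improvedGoA, improvedGoB, hb, hms, hme]; rfl
  | cons w rest' ih =>
    intro n lo dp mv ms me best hdrop hdpL hslot hbest
    -- text[n] = w, n < |text|, drop (n+1) = rest'
    have hget? : text[n]? = some w := by
      have h0 : (text.drop n)[0]? = text[n + 0]? := List.getElem?_drop
      rw [hdrop] at h0
      simpa using h0.symm
    have hn : n < text.length := (List.getElem?_eq_some_iff.mp hget?).1
    have hwget : text.getD n "" = w := by
      rw [List.getD_eq_getElem?_getD, hget?]; rfl
    have hdrop' : text.drop (n+1) = rest' := by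
      have := congrArg List.tail hdrop
      simpa [List.tail_drop] using this
    rw [improvedGoA, improvedGoB]
    cases hw : indexes.get? w with
    | none =>
      simp only []
      rw [if_neg (by simp : ¬ ((none : Option Int) = some (L - 1)))]
      have hlat : ∀ k : Int, latestB indexes text (n+1) k = latestB indexes text n k := by
        intro k
        rw [latestB, hwget, hw]
        simp
      have := ih (n+1) lo dp mv ms me best hdrop' hdpL
        (fun k hk0 hkL => by
          obtain ⟨h1, h2⟩ := hslot k hk0 hkL
          exact ⟨by rw [hlat]; exact h1, by rw [chainVal, hlat]; exact h2⟩)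
        hbest
      rw [show ((n:Int) + 1) = ((n+1 : Nat) : Int) by push_cast; ring]
      exact this
    | some k =>
      simp only []
      obtain ⟨hk0, hkL⟩ := hidx w k hw
      have hkn : k.toNat < dp.length := by omega
      have hknc : (k.toNat : Int) = k := Int.toNat_of_nonneg hk0
      have hlatk : latestB indexes text (n+1) k = some n := by
        rw [latestB, hwget, hw]
        simp
      have hlatne : ∀ j : Int, j ≠ k → latestB indexes text (n+1) j = latestB indexes text n j := by
        intro j hj
        rw [latestB, hwget, hw]
        simp [Ne.symm hj]
      -- characterise the new dp slot k as cvk = match chainB n k.toNat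
      -- and establish the slot invariant for n+1
      -- first compute lo'.getD (k-1) 0 when needed
      by_cases hk : k = 0
      · -- k = 0 branch: dp' = dp.set 0 0
        subst hk
        rw [if_pos rfl]
        have hdpk : (dp.set 0 0).getD (Int.toNat 0) 0 = 0 := by
          simpa using getD_set_self dp 0 0 0 (by omega)
        rw [hdpk]
        have hcv : chainVal indexes text (n+1) 0 = 0 := by
          rw [chainVal, hlatk]
          simp [chainB]
        have hslot' : ∀ j : Int, 0 ≤ j → j < L →
            (lo.insert 0 (n:Int)).get? j =
              (latestB indexes text (n+1) j).map (fun p => (p : Int)) ∧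
            (dp.set 0 0).getD j.toNat 0 = chainVal indexes text (n+1) j := by
          intro j hj0 hjL
          by_cases hj : j = 0
          · subst hj
            constructor
            · rw [PySem.Dict.get?_insert_self, hlatk]; rfl
            · rw [show Int.toNat 0 = 0 from rfl, getD_set_self dp 0 0 0 (by omega), hcv]
          · obtain ⟨h1, h2⟩ := hslot j hj0 hjL
            have hjt : j.toNat ≠ 0 := by omega
            constructor
            · rw [PySem.Dict.get?_insert, if_neg hj, h1, hlatne j hj]
            · rw [getD_set_ne dp 0 j.toNat 0 0 (Ne.symm hjt), h2, chainVal, chainVal,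
                hlatne j hj]
        by_cases hL1 : (0:Int) = L - 1
        · rw [if_pos (by rw [hL1] : (some (0:Int)) = some (L - 1))]
          have hchB : chainB indexes text n (L-1).toNat = some n := by
            rw [show (L-1).toNat = 0 by omega, chainB]
          rw [hchB]
          rcases hbest with ⟨hb, hmv, _, _⟩ | ⟨s, e, hb, hms, hme, hmv⟩
          · have hcond : (0:Int) ≠ -1 ∧ (0:Int) = L - 1 ∧ mv > 0 := by
              refine ⟨by omega, hL1, ?_⟩
              rw [hmv]
              have hnl : (n:Int) < (text.length:Int) := by exact_mod_cast hn
              omega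
            rw [if_pos hcond, hb]
            have := ih (n+1) _ _ 0 ((n:Int) - 0) ((n:Int)+1) (some (n, n+1)) hdrop'
              (by simpa using hdpL) hslot'
              (Or.inr ⟨n, n+1, rfl, by omega, by omega, by omega⟩)
            rw [show ((n:Int) + 1) = ((n+1 : Nat) : Int) by push_cast; ring]
            exact this
          · rw [hb]
            simp only []
            by_cases hcmp : (n:Int) - (n:Nat) < (e:Int) - s - 1
            · have hcond : (0:Int) ≠ -1 ∧ (0:Int) = L - 1 ∧ mv > 0 := by
                refine ⟨by omega, hL1, by omega⟩
              rw [if_pos hcond, if_pos hcmp]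
              have := ih (n+1) _ _ 0 ((n:Int) - 0) ((n:Int)+1) (some (n, n+1)) hdrop'
                (by simpa using hdpL) hslot'
                (Or.inr ⟨n, n+1, rfl, by omega, by omega, by omega⟩)
              rw [show ((n:Int) + 1) = ((n+1 : Nat) : Int) by push_cast; ring]
              exact this
            · have hcond : ¬((0:Int) ≠ -1 ∧ (0:Int) = L - 1 ∧ mv > 0) := by
                intro ⟨_, _, h3⟩; omega
              rw [if_neg hcond, if_neg hcmp]
              have := ih (n+1) _ _ mv ms me (some (s, e)) hdrop'
                (by simpa using hdpL) hslot'
                (Or.inr ⟨s, e, rfl, hms, hme, hmv⟩)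
              rw [show ((n:Int) + 1) = ((n+1 : Nat) : Int) by push_cast; ring]
              exact this
        · rw [if_neg (show ¬ ((some (0:Int)) = some (L - 1)) by
            intro hc; injection hc with hc; exact hL1 hc)]
          have hcond : ¬((0:Int) ≠ -1 ∧ (0:Int) = L - 1 ∧ mv > 0) := by
            intro ⟨_, h2, _⟩; exact hL1 h2
          rw [if_neg hcond]
          have := ih (n+1) _ _ mv ms me best hdrop' (by simpa using hdpL) hslot' hbest
          rw [show ((n:Int) + 1) = ((n+1 : Nat) : Int) by push_cast; ring]
          exact this
      · -- k ≠ 0 branch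
        rw [if_neg hk]
        have hk1n : (k-1).toNat < dp.length := by omega
        have hk1c : ((k-1).toNat : Int) = k - 1 := Int.toNat_of_nonneg (by omega)
        have hkt : k.toNat = (k-1).toNat + 1 := by omega
        obtain ⟨hlo1, hdp1⟩ := hslot (k-1) (by omega) (by omega)
        have hchainn : chainB indexes text n k.toNat =
            match latestB indexes text n (k-1) with
            | none => none
            | some p => chainB indexes text p (k-1).toNat := by
          rw [hkt, chainB, hk1c]
        -- the new dp value and chain value agree; case on the slot k-1 state
        cases hlat1 : latestB indexes text n (k-1) with
        | none =>
          -- dp[k-1] = -1, chain broken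
          have hdm : dp.getD (k-1).toNat 0 = -1 := by
            rw [hdp1, chainVal, hlat1]
          rw [if_neg (show ¬(dp.getD (k-1).toNat 0 ≠ -1) by rw [hdm]; simp)]
          have hdpk : (dp.set k.toNat (-1)).getD k.toNat 0 = -1 :=
            getD_set_self dp k.toNat (-1) 0 hkn
          rw [hdpk]
          have hcvk : chainVal indexes text (n+1) k = -1 := by
            rw [chainVal, hlatk]
            simp only []
            rw [hchainn, hlat1]
          have hslot' : ∀ j : Int, 0 ≤ j → j < L →
              (lo.insert k (n:Int)).get? j =
                (latestB indexes text (n+1) j).map (fun p => (p : Int)) ∧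
              (dp.set k.toNat (-1)).getD j.toNat 0 = chainVal indexes text (n+1) j := by
            intro j hj0 hjL
            by_cases hj : j = k
            · exact ⟨by rw [hj, PySem.Dict.get?_insert_self, hlatk]; rfl,
                by rw [hj, getD_set_self dp k.toNat (-1) 0 hkn, hcvk]⟩
            · obtain ⟨h1, h2⟩ := hslot j hj0 hjL
              have hjt : j.toNat ≠ k.toNat := by omega
              exact ⟨by rw [PySem.Dict.get?_insert, if_neg hj, h1, hlatne j hj],
                by rw [getD_set_ne dp k.toNat j.toNat (-1) 0 (Ne.symm hjt), h2,
                  chainVal, chainVal, hlatne j hj]⟩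
          rw [if_neg (show ¬((-1:Int) ≠ -1 ∧ k = L - 1 ∧ mv > -1) by
            intro ⟨h1, _, _⟩; exact h1 rfl)]
          have hIH := ih (n+1) (lo.insert k (n:Int)) (dp.set k.toNat (-1)) mv ms me best
            hdrop' (by simpa using hdpL) hslot' hbest
          rw [show ((n:Int) + 1) = ((n+1 : Nat) : Int) by push_cast; ring]
          by_cases hBc : (some k : Option Int) = some (L - 1)
          · rw [if_pos hBc]
            injection hBc with hBc
            have hcn : chainB indexes text n (L-1).toNat = none := by
              rw [← hBc, hchainn, hlat1]
            rw [hcn]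
            exact hIH
          · rw [if_neg hBc]
            exact hIH
        | some p' =>
          cases hch1 : chainB indexes text p' (k-1).toNat with
          | none =>
            -- chain from p' broken: dp[k-1] = -1 again
            have hdm : dp.getD (k-1).toNat 0 = -1 := by
              rw [hdp1, chainVal, hlat1]
              simp only []
              rw [hch1]
            rw [if_neg (show ¬(dp.getD (k-1).toNat 0 ≠ -1) by rw [hdm]; simp)]
            have hdpk : (dp.set k.toNat (-1)).getD k.toNat 0 = -1 :=
              getD_set_self dp k.toNat (-1) 0 hkn
            rw [hdpk]
            have hcvk : chainVal indexes text (n+1) k = -1 := by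
              rw [chainVal, hlatk]
              simp only []
              rw [hchainn, hlat1]
              simp only []
              rw [hch1]
            have hslot' : ∀ j : Int, 0 ≤ j → j < L →
                (lo.insert k (n:Int)).get? j =
                  (latestB indexes text (n+1) j).map (fun p => (p : Int)) ∧
                (dp.set k.toNat (-1)).getD j.toNat 0 = chainVal indexes text (n+1) j := by
              intro j hj0 hjL
              by_cases hj : j = k
              · exact ⟨by rw [hj, PySem.Dict.get?_insert_self, hlatk]; rfl,
                  by rw [hj, getD_set_self dp k.toNat (-1) 0 hkn, hcvk]⟩
              · obtain ⟨h1, h2⟩ := hslot j hj0 hjL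
                have hjt : j.toNat ≠ k.toNat := by omega
                exact ⟨by rw [PySem.Dict.get?_insert, if_neg hj, h1, hlatne j hj],
                  by rw [getD_set_ne dp k.toNat j.toNat (-1) 0 (Ne.symm hjt), h2,
                    chainVal, chainVal, hlatne j hj]⟩
            rw [if_neg (show ¬((-1:Int) ≠ -1 ∧ k = L - 1 ∧ mv > -1) by
            intro ⟨h1, _, _⟩; exact h1 rfl)]
            have hIH := ih (n+1) (lo.insert k (n:Int)) (dp.set k.toNat (-1)) mv ms me best
              hdrop' (by simpa using hdpL) hslot' hbest
            rw [show ((n:Int) + 1) = ((n+1 : Nat) : Int) by push_cast; ring]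
            by_cases hBc : (some k : Option Int) = some (L - 1)
            · rw [if_pos hBc]
              injection hBc with hBc
              have hcn : chainB indexes text n (L-1).toNat = none := by
                rw [← hBc, hchainn, hlat1]
                simp only []
                rw [hch1]
              rw [hcn]
              exact hIH
            · rw [if_neg hBc]
              exact hIH
          | some s =>
            -- chain complete: dp[k-1] = p' - s, new dp[k] = n - s
            have hsp : s ≤ p' := chainB_le indexes text (k-1).toNat p' s hch1
            have hpn : p' < n := latestB_lt indexes text n (k-1) p' hlat1
            have hdm : dp.getD (k-1).toNat 0 = (p' : Int) - s := by
              rw [hdp1, chainVal, hlat1]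
              simp only []
              rw [hch1]
            rw [if_pos (show dp.getD (k-1).toNat 0 ≠ -1 by rw [hdm]; omega)]
            have hlo' : (lo.insert k (n:Int)).getD (k-1) 0 = (p' : Int) := by
              rw [PySem.Dict.getD_insert, if_neg (by omega),
                PySem.Dict.getD_eq_get?_getD, hlo1, hlat1]
              rfl
            have hval : dp.getD (k-1).toNat 0 + (n:Int) - (lo.insert k (n:Int)).getD (k-1) 0
                = (n:Int) - s := by rw [hdm, hlo']; ring
            rw [hval]
            have hdpk : (dp.set k.toNat ((n:Int) - s)).getD k.toNat 0 = (n:Int) - s :=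
              getD_set_self dp k.toNat _ 0 hkn
            rw [hdpk]
            have hchnk : chainB indexes text n k.toNat = some s := by
              rw [hchainn, hlat1]
              simp only []
              rw [hch1]
            have hcvk : chainVal indexes text (n+1) k = (n:Int) - s := by
              rw [chainVal, hlatk]
              simp only []
              rw [hchnk]
            have hslot' : ∀ j : Int, 0 ≤ j → j < L →
                (lo.insert k (n:Int)).get? j =
                  (latestB indexes text (n+1) j).map (fun p => (p : Int)) ∧
                (dp.set k.toNat ((n:Int) - s)).getD j.toNat 0 = chainVal indexes text (n+1) j := by
              intro j hj0 hjL
              by_cases hj : j = k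
              · exact ⟨by rw [hj, PySem.Dict.get?_insert_self, hlatk]; rfl,
                  by rw [hj, getD_set_self dp k.toNat _ 0 hkn, hcvk]⟩
              · obtain ⟨h1, h2⟩ := hslot j hj0 hjL
                have hjt : j.toNat ≠ k.toNat := by omega
                exact ⟨by rw [PySem.Dict.get?_insert, if_neg hj, h1, hlatne j hj],
                  by rw [getD_set_ne dp k.toNat j.toNat _ 0 (Ne.symm hjt), h2,
                    chainVal, chainVal, hlatne j hj]⟩
            by_cases hL1 : k = L - 1
            · rw [if_pos (by rw [hL1] : (some k : Option Int) = some (L - 1))]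
              have hchB : chainB indexes text n (L-1).toNat = some s := by
                rw [← hL1]; exact hchnk
              rw [hchB]
              rcases hbest with ⟨hb, hmv, _, _⟩ | ⟨bs, be, hb, hms, hme, hmv⟩
              · have hcond : (n:Int) - s ≠ -1 ∧ k = L - 1 ∧ mv > (n:Int) - s := by
                  refine ⟨by omega, hL1, ?_⟩
                  rw [hmv]
                  have : (n:Int) < text.length := by exact_mod_cast hn
                  omega
                rw [if_pos hcond, hb]
                have := ih (n+1) _ _ ((n:Int) - s) ((n:Int) - ((n:Int) - s)) ((n:Int)+1)
                  (some (s, n+1)) hdrop' (by simpa using hdpL) hslot'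
                  (Or.inr ⟨s, n+1, rfl, by omega, by omega, by omega⟩)
                rw [show ((n:Int) + 1) = ((n+1 : Nat) : Int) by push_cast; ring]
                exact this
              · rw [hb]
                simp only []
                by_cases hcmp : (n:Int) - s < (be:Int) - bs - 1
                · have hcond : (n:Int) - s ≠ -1 ∧ k = L - 1 ∧ mv > (n:Int) - s := by
                    refine ⟨by omega, hL1, by omega⟩
                  rw [if_pos hcond, if_pos hcmp]
                  have := ih (n+1) _ _ ((n:Int) - s) ((n:Int) - ((n:Int) - s)) ((n:Int)+1)
                    (some (s, n+1)) hdrop' (by simpa using hdpL) hslot'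
                    (Or.inr ⟨s, n+1, rfl, by omega, by omega, by omega⟩)
                  rw [show ((n:Int) + 1) = ((n+1 : Nat) : Int) by push_cast; ring]
                  exact this
                · have hcond : ¬((n:Int) - s ≠ -1 ∧ k = L - 1 ∧ mv > (n:Int) - s) := by
                    intro ⟨_, _, h3⟩; omega
                  rw [if_neg hcond, if_neg hcmp]
                  have := ih (n+1) _ _ mv ms me (some (bs, be)) hdrop'
                    (by simpa using hdpL) hslot'
                    (Or.inr ⟨bs, be, rfl, hms, hme, hmv⟩)
                  rw [show ((n:Int) + 1) = ((n+1 : Nat) : Int) by push_cast; ring]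
                  exact this
            · rw [if_neg (show ¬ ((some k : Option Int) = some (L - 1)) by
                intro hc; injection hc with hc; exact hL1 hc)]
              have hcond : ¬((n:Int) - s ≠ -1 ∧ k = L - 1 ∧ mv > (n:Int) - s) := by
                intro ⟨_, h2, _⟩; exact hL1 h2
              rw [if_neg hcond]
              have := ih (n+1) _ _ mv ms me best hdrop' (by simpa using hdpL) hslot' hbest
              rw [show ((n:Int) + 1) = ((n+1 : Nat) : Int) by push_cast; ring]
              exact this

-- ===== VERDICT (by name: the statement is the Claim_ definition above) =====
theorem improved_spec : Claim_equal_improved := by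
  intro words text _
  unfold Spec_improved improved improved_alt
  have h := go_eq (words.length : Int) (mkIndexes words) text
    (fun w k hw => mkIndexes_range words w k hw)
    text 0 PySem.Dict.empty (List.replicate words.length (-1))
    (text.length : Int) 0 0 none
    rfl (by simp) ?_ (Or.inl ⟨rfl, rfl, rfl, rfl⟩)
  · rw [show ((0:Nat):Int) = (0:Int) from rfl] at h
    rw [h]
    cases hb : improvedGoB (words.length : Int) (mkIndexes words) text 0 text none with
    | none => simp [bestToPair]
    | some p => cases p with | mk s e => simp [bestToPair]
  · intro k hk0 hkL
    constructor
    · simp [PySem.Dict.get?_empty, latestB]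
    · have hk : k.toNat < words.length := by omega
      simp [List.getD, hk, chainVal, latestB]
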